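-- pv_equiv track=rewrite | github.com/celnetamit/omniscope-ai | backend_db/methods_generator.py | _generate_data_processing_section
-- ===== SOURCE A (Python) =====
-- from typing import Dict, Any, List, Optional
--
-- def _generate_data_processing_section(
--
--     pipeline_data: Optional[Dict[str, Any]],
--     pipeline_id: Optional[str]
-- ) -> str:
--     """Generate data processing methods description"""
--     section = "<h3>Data Processing</h3>\n"
--
--     if pipeline_data:
--         nodes = pipeline_data.get('nodes', [])
--
--         # Describe data upload
--         upload_nodes = [n for n in nodes if n.get('type') == 'upload']
--         if upload_nodes:
--             section += "<p>Data were uploaded and processed using the OmniScope AI platform. "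
--             section += "Quality control checks were performed to ensure data integrity, "
--             section += "including validation of file formats, detection of missing values, "
--             section += "and assessment of data distributions.</p>\n"
--
--         # Describe preprocessing steps
--         preprocess_nodes = [n for n in nodes if n.get('type') in ['normalize', 'filter', 'transform']]
--         if preprocess_nodes:
--             section += "<p>Data preprocessing included the following steps: "
--             steps = []
--             for node in preprocess_nodes:
--                 node_type = node.get('type', 'unknown')
--                 if node_type == 'normalize':
--                     steps.append("normalization using z-score standardization")
--                 elif node_type == 'filter':
--                     steps.append("filtering to remove low-quality features")
--                 elif node_type == 'transform':
--                     steps.append("log transformation to stabilize variance")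
--             section += ", ".join(steps) + ".</p>\n"
--
--         # Describe feature selection
--         feature_nodes = [n for n in nodes if n.get('type') == 'feature_selection']
--         if feature_nodes:
--             section += "<p>Feature selection was performed to identify the most informative variables. "
--             section += "Features with low variance or high correlation were removed to reduce dimensionality "
--             section += "and improve model performance.</p>\n"
--     else:
--         section += "<p>Data processing pipeline details were not available for this analysis.</p>\n"
--
--     return section
-- ===== SOURCE B (Python) =====
-- from typing import Dict, Any, Optional
--
-- _UPLOAD_PARA = (
--     "<p>Data were uploaded and processed using the OmniScope AI platform. "
--     "Quality control checks were performed to ensure data integrity, "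
--     "including validation of file formats, detection of missing values, "
--     "and assessment of data distributions.</p>\n"
-- )
--
-- _FEATURE_PARA = (
--     "<p>Feature selection was performed to identify the most informative variables. "
--     "Features with low variance or high correlation were removed to reduce dimensionality "
--     "and improve model performance.</p>\n"
-- )
--
-- _STEP_TEXT = {
--     'normalize': "normalization using z-score standardization",
--     'filter': "filtering to remove low-quality features",
--     'transform': "log transformation to stabilize variance",
-- }
--
--
-- def _generate_data_processing_section(
--     pipeline_data: Optional[Dict[str, Any]],
--     pipeline_id: Optional[str]
-- ) -> str:
--     """Generate data processing methods description (single pass over nodes)."""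
--     if not pipeline_data:
--         return ("<h3>Data Processing</h3>\n"
--                 "<p>Data processing pipeline details were not available for this analysis.</p>\n")
--
--     has_upload = False
--     has_feature = False
--     steps = []
--     for node in pipeline_data.get('nodes', []):
--         t = node.get('type')
--         if t == 'upload':
--             has_upload = True
--         elif t == 'feature_selection':
--             has_feature = True
--         elif t in _STEP_TEXT:
--             steps.append(_STEP_TEXT[t])
--
--     return ("<h3>Data Processing</h3>\n"
--             + (_UPLOAD_PARA if has_upload else "")
--             + ("<p>Data preprocessing included the following steps: " + ", ".join(steps) + ".</p>\n"
--                if steps else "")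
--             + (_FEATURE_PARA if has_feature else ""))
-- ===== Notes on version B (the rewrite author's own statement) =====
-- stated objective: simpler
-- what changed: B replaces A's three separate filtering comprehensions (plus a second pass over the preprocess nodes to build step strings) by one single pass over nodes that sets the upload/feature flags and builds the ordered steps list via a text table, then assembles the result as one concatenation of conditional blocks.
import Mathlib
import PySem

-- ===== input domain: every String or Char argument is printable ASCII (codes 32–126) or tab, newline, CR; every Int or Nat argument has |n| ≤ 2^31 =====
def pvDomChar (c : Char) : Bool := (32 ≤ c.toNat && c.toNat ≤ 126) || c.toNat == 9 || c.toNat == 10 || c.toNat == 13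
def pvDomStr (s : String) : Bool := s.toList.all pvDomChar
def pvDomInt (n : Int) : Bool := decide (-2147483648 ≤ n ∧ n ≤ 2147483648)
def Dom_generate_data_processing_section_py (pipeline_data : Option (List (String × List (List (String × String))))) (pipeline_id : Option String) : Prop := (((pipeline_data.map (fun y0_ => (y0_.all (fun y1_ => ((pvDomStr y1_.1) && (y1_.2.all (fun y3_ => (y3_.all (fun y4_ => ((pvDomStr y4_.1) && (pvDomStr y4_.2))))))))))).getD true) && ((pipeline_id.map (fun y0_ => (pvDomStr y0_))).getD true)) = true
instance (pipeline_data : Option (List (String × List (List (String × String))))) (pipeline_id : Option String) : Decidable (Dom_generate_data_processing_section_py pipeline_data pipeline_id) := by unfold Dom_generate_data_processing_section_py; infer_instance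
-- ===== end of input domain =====

-- B makes one pass over the nodes (flags + ordered steps list via a text table) instead of A's
-- three filtering comprehensions plus a separate steps loop; same output, objective: simpler.

-- dict.get on an association list (first match = Python dict lookup under this encoding); shared primitive
def pvGet {α : Type} (l : List (String × α)) (k : String) : Option α :=
  (l.find? (fun p => p.1 == k)).map Prod.snd

def pvGetD {α : Type} (l : List (String × α)) (k : String) (dflt : α) : α :=
  (pvGet l k).getD dflt

-- ===== PORT A =====
-- the three node-type tests of A's comprehensions, named
def pvIsUpload (n : List (String × String)) : Bool :=
  pvGet n "type" == some "upload"

def pvIsPreprocess (n : List (String × String)) : Bool :=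
  match pvGet n "type" with
  | some t => ["normalize", "filter", "transform"].contains t
  | none => false

def pvIsFeature (n : List (String × String)) : Bool :=
  pvGet n "type" == some "feature_selection"

-- one iteration of A's `for node in preprocess_nodes` steps loop
def pvStepAcc (steps : List String) (node : List (String × String)) : List String :=
  let node_type := pvGetD node "type" "unknown"
  if node_type == "normalize" then steps ++ ["normalization using z-score standardization"]
  else if node_type == "filter" then steps ++ ["filtering to remove low-quality features"]
  else if node_type == "transform" then steps ++ ["log transformation to stabilize variance"]
  else steps

def generate_data_processing_section_py (pipeline_data : Option (List (String × List (List (String × String))))) (pipeline_id : Option String) : String :=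
  let sect := "<h3>Data Processing</h3>\n"
  match pipeline_data with
  | some d =>
    if d.isEmpty then
      sect ++ "<p>Data processing pipeline details were not available for this analysis.</p>\n"
    else
      let nodes := pvGetD d "nodes" []
      let upload_nodes := nodes.filter pvIsUpload
      let sect :=
        if upload_nodes.isEmpty then sect
        else
          sect ++ "<p>Data were uploaded and processed using the OmniScope AI platform. "
            ++ "Quality control checks were performed to ensure data integrity, "
            ++ "including validation of file formats, detection of missing values, "
            ++ "and assessment of data distributions.</p>\n"
      let preprocess_nodes := nodes.filter pvIsPreprocess
      let sect :=
        if preprocess_nodes.isEmpty then sect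
        else
          let sect := sect ++ "<p>Data preprocessing included the following steps: "
          let steps := preprocess_nodes.foldl pvStepAcc []
          sect ++ PySem.Str.join ", " steps ++ ".</p>\n"
      let feature_nodes := nodes.filter pvIsFeature
      let sect :=
        if feature_nodes.isEmpty then sect
        else
          sect ++ "<p>Feature selection was performed to identify the most informative variables. "
            ++ "Features with low variance or high correlation were removed to reduce dimensionality "
            ++ "and improve model performance.</p>\n"
      sect
  | none =>
    sect ++ "<p>Data processing pipeline details were not available for this analysis.</p>\n"

-- ===== PORT B =====
def pvUploadPara : String :=
  "<p>Data were uploaded and processed using the OmniScope AI platform. Quality control checks were performed to ensure data integrity, including validation of file formats, detection of missing values, and assessment of data distributions.</p>\n"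

def pvFeaturePara : String :=
  "<p>Feature selection was performed to identify the most informative variables. Features with low variance or high correlation were removed to reduce dimensionality and improve model performance.</p>\n"

def pvStepText : List (String × String) :=
  [("normalize", "normalization using z-score standardization"),
   ("filter", "filtering to remove low-quality features"),
   ("transform", "log transformation to stabilize variance")]

-- one iteration of B's single pass: state (has_upload, steps, has_feature)
def pvScanStep (st : Bool × List String × Bool) (node : List (String × String)) : Bool × List String × Bool :=
  let t := pvGet node "type"
  if t == some "upload" then (true, st.2.1, st.2.2)
  else if t == some "feature_selection" then (st.1, st.2.1, true)
  else
    match t with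
    | some tv =>
      match pvGet pvStepText tv with
      | some s => (st.1, st.2.1 ++ [s], st.2.2)
      | none => st
    | none => st

def generate_data_processing_section_py_alt (pipeline_data : Option (List (String × List (List (String × String))))) (pipeline_id : Option String) : String :=
  match pipeline_data with
  | none =>
    "<h3>Data Processing</h3>\n<p>Data processing pipeline details were not available for this analysis.</p>\n"
  | some d =>
    if d.isEmpty then
      "<h3>Data Processing</h3>\n<p>Data processing pipeline details were not available for this analysis.</p>\n"
    else
      let st := (pvGetD d "nodes" []).foldl pvScanStep (false, [], false)
      "<h3>Data Processing</h3>\n"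
        ++ (if st.1 then pvUploadPara else "")
        ++ (if st.2.1.isEmpty then ""
            else "<p>Data preprocessing included the following steps: "
              ++ PySem.Str.join ", " st.2.1 ++ ".</p>\n")
        ++ (if st.2.2 then pvFeaturePara else "")

-- ===== PRECONDITION & SPEC =====
def Spec_generate_data_processing_section_py (pipeline_data : Option (List (String × List (List (String × String))))) (pipeline_id : Option String) (out : String) : Prop := out = generate_data_processing_section_py_alt pipeline_data pipeline_id
instance (pipeline_data : Option (List (String × List (List (String × String))))) (pipeline_id : Option String) (out : String) : Decidable (Spec_generate_data_processing_section_py pipeline_data pipeline_id out) := by unfold Spec_generate_data_processing_section_py; infer_instance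

-- ===== CLAIM (what is proved, stated in full; the proofs are below) =====
def Claim_equal_generate_data_processing_section_py : Prop := ∀ (pipeline_data : Option (List (String × List (List (String × String))))) (pipeline_id : Option String), Dom_generate_data_processing_section_py pipeline_data pipeline_id → Spec_generate_data_processing_section_py pipeline_data pipeline_id (generate_data_processing_section_py pipeline_data pipeline_id)

-- ===== LEMMAS AND PROOFS =====

-- the step text a preprocess node contributes (default branch unused on preprocess nodes)
def pvStepOf (n : List (String × String)) : String :=
  pvGetD pvStepText (pvGetD n "type" "unknown") ""

lemma pvStepAcc_eq_map (l : List (List (String × String))) (h : ∀ n ∈ l, pvIsPreprocess n = true) (s : List String) :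
    l.foldl pvStepAcc s = s ++ l.map pvStepOf := by
  induction l generalizing s with
  | nil => simp
  | cons n l ih =>
    have hn := h n (by simp)
    have hl : ∀ m ∈ l, pvIsPreprocess m = true := fun m hm => h m (by simp [hm])
    simp only [List.foldl_cons, List.map_cons, ih hl]
    have hone : pvStepAcc s n = s ++ [pvStepOf n] := by
      unfold pvIsPreprocess at hn
      unfold pvStepAcc pvStepOf pvGetD
      cases hg : pvGet n "type" with
      | none => rw [hg] at hn; exact absurd hn (by simp)
      | some t =>
        rw [hg] at hn
        simp only [List.contains_eq_mem, List.mem_cons, List.mem_singleton, decide_eq_true_eq,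
          List.not_mem_nil, or_false] at hn
        rcases hn with h1 | h1 | h1 <;> subst h1 <;> simp [pvStepText, pvGet]
    rw [hone]; simp

lemma pvScan_spec (l : List (List (String × String))) (u f : Bool) (s : List String) :
    l.foldl pvScanStep (u, s, f) =
      (u || l.any pvIsUpload, s ++ (l.filter pvIsPreprocess).map pvStepOf, f || l.any pvIsFeature) := by
  induction l generalizing u s f with
  | nil => simp
  | cons n l ih =>
    simp only [List.foldl_cons, List.any_cons, List.filter_cons]
    have hstep : pvScanStep (u, s, f) n =
        (u || pvIsUpload n, s ++ (if pvIsPreprocess n then [pvStepOf n] else []), f || pvIsFeature n) := by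
      cases hg : pvGet n "type" with
      | none => simp [pvScanStep, pvIsUpload, pvIsPreprocess, pvIsFeature, hg]
      | some t =>
        have hup : pvIsUpload n = (t == "upload") := by simp [pvIsUpload, hg]
        have hfe : pvIsFeature n = (t == "feature_selection") := by simp [pvIsFeature, hg]
        have hpp : pvIsPreprocess n = ["normalize", "filter", "transform"].contains t := by
          simp [pvIsPreprocess, hg]
        have hof : pvStepOf n = pvGetD pvStepText t "" := by
          simp [pvStepOf, pvGetD, hg]
        by_cases h1 : t = "upload"
        · subst h1; simp [pvScanStep, hg, hup, hfe, hpp]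
        · by_cases h2 : t = "feature_selection"
          · subst h2; simp [pvScanStep, hg, hup, hfe, hpp]
          · by_cases h3 : t = "normalize"
            · subst h3
              have htab : pvGet pvStepText "normalize" =
                  some "normalization using z-score standardization" := by rfl
              simp [pvScanStep, hg, hup, hfe, hpp, hof, htab, pvGetD]
            · by_cases h4 : t = "filter"
              · subst h4
                have htab : pvGet pvStepText "filter" =
                    some "filtering to remove low-quality features" := by rfl
                simp [pvScanStep, hg, hup, hfe, hpp, hof, htab, pvGetD]
              · by_cases h5 : t = "transform"
                · subst h5
                  have htab : pvGet pvStepText "transform" =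
                      some "log transformation to stabilize variance" := by rfl
                  simp [pvScanStep, hg, hup, hfe, hpp, hof, htab, pvGetD]
                · have htab : pvGet pvStepText t = none := by
                    unfold pvGet pvStepText
                    rw [List.find?_eq_none.mpr]
                    · rfl
                    · intro x hx
                      simp only [List.mem_cons, List.not_mem_nil, or_false] at hx
                      rcases hx with h | h | h <;> subst h <;> intro hc <;>
                        simp only [beq_iff_eq] at hc
                      · exact h3 hc.symm
                      · exact h4 hc.symm
                      · exact h5 hc.symm
                  simp [pvScanStep, hg, hup, hfe, hpp, htab, h1, h2, h3, h4, h5]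
    rw [hstep, ih]
    by_cases hp : pvIsPreprocess n = true
    · simp [hp, Bool.or_assoc]
    · simp [hp, Bool.or_assoc]

lemma pv_filter_isEmpty_eq_not_any (l : List (List (String × String))) (p : List (String × String) → Bool) :
    (l.filter p).isEmpty = !(l.any p) := by
  induction l with
  | nil => rfl
  | cons a l ih =>
    cases h : p a <;> simp [List.filter_cons, List.any_cons, h, ih]

-- ===== VERDICT (by name: the statement is the Claim_ definition above) =====
set_option maxRecDepth 4000 in
theorem generate_data_processing_section_py_spec : Claim_equal_generate_data_processing_section_py := by
  intro pd pid _
  show generate_data_processing_section_py pd pid = generate_data_processing_section_py_alt pd pid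
  cases pd with
  | none => simp [generate_data_processing_section_py, generate_data_processing_section_py_alt]
  | some d =>
    by_cases hd : d.isEmpty
    · simp [generate_data_processing_section_py, generate_data_processing_section_py_alt, hd]
    · simp only [generate_data_processing_section_py, generate_data_processing_section_py_alt, hd,
        Bool.false_eq_true, if_false]
      set nodes := pvGetD d "nodes" [] with hn
      rw [pvScan_spec]
      simp only [List.nil_append, Bool.false_or]
      have hsteps : (nodes.filter pvIsPreprocess).foldl pvStepAcc [] =
          (nodes.filter pvIsPreprocess).map pvStepOf := by
        rw [pvStepAcc_eq_map]
        · simp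
        · intro m hm; exact (List.mem_filter.mp hm).2
      have hmape : ((nodes.filter pvIsPreprocess).map pvStepOf).isEmpty =
          (nodes.filter pvIsPreprocess).isEmpty := by
        cases nodes.filter pvIsPreprocess <;> rfl
      rw [hsteps, pv_filter_isEmpty_eq_not_any nodes pvIsUpload,
        pv_filter_isEmpty_eq_not_any nodes pvIsFeature, hmape,
        pv_filter_isEmpty_eq_not_any nodes pvIsPreprocess]
      cases h1 : nodes.any pvIsUpload <;>
      cases h2 : nodes.any pvIsPreprocess <;>
      cases h3 : nodes.any pvIsFeature <;>
        (apply String.toList_inj.mp; simp [pvUploadPara, pvFeaturePara])
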